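-- pv_equiv track=rewrite | github.com/yeoeol/Algo | 프로그래머스/2/388353. 지게차와 크레인/지게차와 크레인.py | dfs
-- ===== SOURCE A (Python) =====
-- dxs = [-1, 1, 0, 0]
--
-- dys = [0, 0, -1, 1]
--
-- def in_range(x, y, n, m):
--     return 0 <= x < n and 0 <= y < m
--
-- def dfs(grid, x, y, visited, n, m):
--     visited[x][y] = True
--     for dx, dy in zip(dxs, dys):
--         nx, ny = x+dx, y+dy
--         if not in_range(nx, ny, n, m):
--             return True
--
--         if grid[nx][ny] == '' and not visited[nx][ny]:
--             if dfs(grid, nx, ny, visited, n, m):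
--                 return True
--
--     return False
-- ===== SOURCE B (Python) =====
-- dxs = [-1, 1, 0, 0]
--
-- dys = [0, 0, -1, 1]
--
-- def in_range(x, y, n, m):
--     return 0 <= x < n and 0 <= y < m
--
-- def dfs(grid, x, y, visited, n, m):
--     # Iterative DFS: explicit stack of (cell, next-direction-index) frames
--     # instead of recursion; marks cells and reads the grid in the exact
--     # same order as the recursive version, so visited ends identical too.
--     visited[x][y] = True
--     stack = [(x, y, 0)]
--     while stack:
--         cx, cy, i = stack[-1]
--         if i >= 4:
--             stack.pop()
--             continue
--         nx, ny = cx + dxs[i], cy + dys[i]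
--         if not in_range(nx, ny, n, m):
--             return True
--         stack[-1] = (cx, cy, i + 1)
--         if grid[nx][ny] == '' and not visited[nx][ny]:
--             visited[nx][ny] = True
--             stack.append((nx, ny, 0))
--     return False
-- ===== Notes on version B (the rewrite author's own statement) =====
-- stated objective: alternative
-- what changed: The recursive flood-fill is replaced by an iterative DFS driven by an explicit stack of (cell, next-direction-index) frames, with the same pre-order marking and early exit on reaching the boundary.
-- outside the precondition, e.g. on dfs([['x'], ['x']], 1, 0, [[False], [False]], 2, 2): A returns True, B returns True
import Mathlib
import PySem

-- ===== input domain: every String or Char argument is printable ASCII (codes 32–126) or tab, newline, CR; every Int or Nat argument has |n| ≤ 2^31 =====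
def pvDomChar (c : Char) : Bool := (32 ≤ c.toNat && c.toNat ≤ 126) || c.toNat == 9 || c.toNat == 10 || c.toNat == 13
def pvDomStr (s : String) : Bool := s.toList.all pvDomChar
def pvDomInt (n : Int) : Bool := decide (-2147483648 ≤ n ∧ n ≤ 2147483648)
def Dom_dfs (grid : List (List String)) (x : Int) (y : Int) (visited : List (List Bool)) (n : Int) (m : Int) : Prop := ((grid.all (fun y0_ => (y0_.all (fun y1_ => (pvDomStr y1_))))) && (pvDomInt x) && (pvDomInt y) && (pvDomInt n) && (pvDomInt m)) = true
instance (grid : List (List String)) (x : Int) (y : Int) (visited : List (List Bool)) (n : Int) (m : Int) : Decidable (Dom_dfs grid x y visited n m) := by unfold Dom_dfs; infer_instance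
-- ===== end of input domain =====

-- B replaces A's recursion by an explicit stack of (cell, next-direction-index) frames,
-- visiting cells and reading the grid in the same order; Python A and B mutate `visited`
-- identically, and the equivalence proved here is about the RETURN value.

-- ===== PORT A =====
-- shared helpers: direction tables, range test, and the Python subscript accesses
def pvDxs : List Int := [-1, 1, 0, 0]
def pvDys : List Int := [0, 0, -1, 1]

def pvInRange (x y n m : Int) : Bool :=
  decide (0 ≤ x) && decide (x < n) && decide (0 ≤ y) && decide (y < m)

-- grid[x][y]; the default "?" is never a Python value here (Pre_ keeps the accesses in range)
def pvGetS (g : List (List String)) (x y : Int) : String :=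
  ((PySem.List.pyGet? g x).bind (fun r => PySem.List.pyGet? r y)).getD "?"

-- visited[x][y] (none = IndexError)
def pvGetB (v : List (List Bool)) (x y : Int) : Option Bool :=
  (PySem.List.pyGet? v x).bind (fun r => PySem.List.pyGet? r y)

-- visited[x][y] = True (no-op where Python would raise; Pre_ excludes that)
def pvSetB (v : List (List Bool)) (x y : Int) : List (List Bool) :=
  match PySem.List.pyGet? v x with
  | none => v
  | some r => PySem.List.pySetD v x (PySem.List.pySetD r y true)

-- the eligibility test grid[nx][ny] == '' and not visited[nx][ny]
def pvElig (grid : List (List String)) (v : List (List Bool)) (nx ny : Int) : Bool :=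
  pvGetS grid nx ny == "" && pvGetB v nx ny == some false

-- number of unvisited cells: the termination measure of the search
def pvCF (v : List (List Bool)) : Nat := (v.map (fun r => r.count false)).sum

-- termination lemmas (used by the ports' `decreasing_by`)
theorem pvCount_set_true_lt (r : List Bool) (k : Nat) (h : r[k]? = some false) :
    (r.set k true).count false < r.count false := by
  induction r generalizing k with
  | nil => simp at h
  | cons b tl ih =>
    cases k with
    | zero =>
      simp at h
      subst h
      simp
    | succ k =>
      simp at h
      have := ih k h
      simp [List.count_cons]
      omega

theorem pvCF_set_lt (v : List (List Bool)) (j : Nat) (r r' : List Bool)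
    (h : v[j]? = some r) (hlt : r'.count false < r.count false) :
    pvCF (v.set j r') < pvCF v := by
  induction v generalizing j with
  | nil => simp at h
  | cons hd tl ih =>
    cases j with
    | zero =>
      simp at h
      subst h
      simp [pvCF]
      omega
    | succ j =>
      simp at h
      have := ih j h
      simp [pvCF] at this ⊢
      omega

theorem pvSetB_lt (v : List (List Bool)) (x y : Int) (hx : 0 ≤ x) (hy : 0 ≤ y)
    (h : pvGetB v x y = some false) : pvCF (pvSetB v x y) < pvCF v := by
  unfold pvGetB at h
  cases hrow : PySem.List.pyGet? v x with
  | none => rw [hrow] at h; simp at h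
  | some r =>
    rw [hrow] at h
    simp at h
    unfold pvSetB
    rw [hrow]
    dsimp only
    rw [PySem.List.pyGet?_of_nonneg v hx] at hrow
    rw [PySem.List.pyGet?_of_nonneg r hy] at h
    rw [PySem.List.pySetD_of_nonneg v _ hx, PySem.List.pySetD_of_nonneg r _ hy]
    exact pvCF_set_lt v x.toNat r _ hrow (pvCount_set_true_lt r y.toNat h)

theorem pvInRange_nonneg {x y n m : Int} (h : ¬ pvInRange x y n m = false) :
    0 ≤ x ∧ 0 ≤ y := by
  simp [pvInRange] at h
  exact ⟨h.1, h.2.2.1⟩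

theorem pvElig_getB {grid : List (List String)} {v : List (List Bool)} {nx ny : Int}
    (h : pvElig grid v nx ny = true) : pvGetB v nx ny = some false := by
  simp [pvElig] at h
  exact h.2

-- A's recursion: `dfsLoop grid n m v x y i` is A's `for` loop resumed at direction
-- index i (the zip of dxs/dys ported as an index loop), on visited state v; it returns
-- (A's return value, the final visited state) together with the invariant that the
-- number of unvisited cells never grows (carried only for termination).
def dfsLoop (grid : List (List String)) (n m : Int) (v : List (List Bool)) (x y : Int)
    (i : Nat) : {p : Bool × List (List Bool) // pvCF p.2 ≤ pvCF v} :=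
  if h4 : 4 ≤ i then ⟨(false, v), Nat.le_refl _⟩                 -- loop exhausted: return False
  else
    if hr : pvInRange (x + pvDxs[i]?.getD 0) (y + pvDys[i]?.getD 0) n m = false then
      ⟨(true, v), Nat.le_refl _⟩                                 -- not in_range: return True
    else if he : pvElig grid v (x + pvDxs[i]?.getD 0) (y + pvDys[i]?.getD 0) = true then
      -- recursive call dfs(grid, nx, ny, ...): it starts by setting visited[nx][ny] = True
      match dfsLoop grid n m (pvSetB v (x + pvDxs[i]?.getD 0) (y + pvDys[i]?.getD 0))
        (x + pvDxs[i]?.getD 0) (y + pvDys[i]?.getD 0) 0 with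
      | ⟨(b1, v1), hp1⟩ =>
        if b1 then
          ⟨(true, v1), le_trans hp1 (le_of_lt (pvSetB_lt _ _ _
            (pvInRange_nonneg hr).1 (pvInRange_nonneg hr).2 (pvElig_getB he)))⟩
        else
          match dfsLoop grid n m v1 x y (i + 1) with
          | ⟨p2, hp2⟩ =>
            ⟨p2, le_trans hp2 (le_trans hp1 (le_of_lt (pvSetB_lt _ _ _
              (pvInRange_nonneg hr).1 (pvInRange_nonneg hr).2 (pvElig_getB he))))⟩
    else
      dfsLoop grid n m v x y (i + 1)
termination_by pvCF v * 5 + (4 - i)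
decreasing_by
  · have h1 := pvSetB_lt v (x + pvDxs[i]?.getD 0) (y + pvDys[i]?.getD 0)
      (pvInRange_nonneg hr).1 (pvInRange_nonneg hr).2 (pvElig_getB he)
    omega
  · have h1 := pvSetB_lt v (x + pvDxs[i]?.getD 0) (y + pvDys[i]?.getD 0)
      (pvInRange_nonneg hr).1 (pvInRange_nonneg hr).2 (pvElig_getB he)
    have h2 : pvCF v1 ≤ pvCF (pvSetB v (x + pvDxs[i]?.getD 0) (y + pvDys[i]?.getD 0)) := hp1
    omega
  · omega

def dfs (grid : List (List String)) (x : Int) (y : Int) (visited : List (List Bool)) (n : Int) (m : Int) : Bool :=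
  -- dfs body: visited[x][y] = True, then the loop from direction 0; the return value
  (dfsLoop grid n m (pvSetB visited x y) x y 0).val.1

-- ===== PORT B =====
-- the stack machine of Source B: frames are (cx, cy, next-direction-index)
def runB (grid : List (List String)) (n m : Int) (v : List (List Bool))
    (stack : List (Int × Int × Nat)) : Bool × List (List Bool) :=
  match stack with
  | [] => (false, v)                                             -- while stack exhausted: return False
  | (cx, cy, i) :: rest =>
    if h4 : 4 ≤ i then runB grid n m v rest                      -- frame done: stack.pop()
    else
      if hr : pvInRange (cx + pvDxs[i]?.getD 0) (cy + pvDys[i]?.getD 0) n m = false then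
        (true, v)                                                -- boundary met: return True
      else if he : pvElig grid v (cx + pvDxs[i]?.getD 0) (cy + pvDys[i]?.getD 0) = true then
        -- mark, advance the top frame's index, push the new frame
        runB grid n m (pvSetB v (cx + pvDxs[i]?.getD 0) (cy + pvDys[i]?.getD 0))
          (((cx + pvDxs[i]?.getD 0), (cy + pvDys[i]?.getD 0), 0) :: (cx, cy, i + 1) :: rest)
      else
        runB grid n m v ((cx, cy, i + 1) :: rest)                -- advance the top frame's index
termination_by pvCF v * 6 + (stack.map (fun f => 5 - f.2.2)).sum + stack.length
decreasing_by
  · simp only [List.map_cons, List.sum_cons, List.length_cons]; omega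
  · have h1 := pvSetB_lt v (cx + pvDxs[i]?.getD 0) (cy + pvDys[i]?.getD 0)
      (pvInRange_nonneg hr).1 (pvInRange_nonneg hr).2 (pvElig_getB he)
    simp only [List.map_cons, List.sum_cons, List.length_cons]; omega
  · simp only [List.map_cons, List.sum_cons, List.length_cons]; omega

def dfs_alt (grid : List (List String)) (x : Int) (y : Int) (visited : List (List Bool)) (n : Int) (m : Int) : Bool :=
  -- visited[x][y] = True; stack = [(x, y, 0)]; run the machine; the return value
  (runB grid n m (pvSetB visited x y) [(x, y, 0)]).1

-- ===== PRECONDITION & SPEC =====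
-- Pre_ excludes the inputs where Python A raises IndexError: a start index invalid for
-- `visited`, or `grid`/`visited` not covering the n×m rectangle (unless the very first
-- probed neighbour (x-1, y) is already out of range, in which case A returns True
-- after touching only the start cell).  The rectangle condition is a closed-form
-- over-approximation of the cells the search can touch, so a few inputs where A happens
-- to return True before reaching a missing cell are excluded too; B returns the
-- identical value on those.
def Pre_dfs (grid : List (List String)) (x : Int) (y : Int) (visited : List (List Bool)) (n : Int) (m : Int) : Prop :=
  (pvGetB visited x y).isSome = true ∧
  (pvInRange (x - 1) y n m = false ∨
    (n ≤ (grid.length : Int) ∧ n ≤ (visited.length : Int) ∧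
     (∀ r ∈ grid.take n.toNat, m ≤ (r.length : Int)) ∧
     (∀ r ∈ visited.take n.toNat, m ≤ (r.length : Int))))
instance (grid : List (List String)) (x : Int) (y : Int) (visited : List (List Bool)) (n : Int) (m : Int) : Decidable (Pre_dfs grid x y visited n m) := by unfold Pre_dfs; infer_instance

def pvWitness_dfs : List (List String) × Int × Int × List (List Bool) × Int × Int :=
  ([[""], ["x"]], 0, 0, [[false], [false]], 2, 1)

def Spec_dfs (grid : List (List String)) (x : Int) (y : Int) (visited : List (List Bool)) (n : Int) (m : Int) (out : Bool) : Prop := out = dfs_alt grid x y visited n m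
instance (grid : List (List String)) (x : Int) (y : Int) (visited : List (List Bool)) (n : Int) (m : Int) (out : Bool) : Decidable (Spec_dfs grid x y visited n m out) := by unfold Spec_dfs; infer_instance

-- ===== CLAIM (what is proved, stated in full; the proofs are below) =====
def Claim_equal_dfs : Prop := ∀ (grid : List (List String)) (x : Int) (y : Int) (visited : List (List Bool)) (n : Int) (m : Int), Dom_dfs grid x y visited n m → Pre_dfs grid x y visited n m → Spec_dfs grid x y visited n m (dfs grid x y visited n m)

-- ===== LEMMAS AND PROOFS =====
-- The stack machine run on (x, y, i) :: rest behaves like A's loop at (x, y, i)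
-- followed by the continuation encoded by rest.
theorem runB_eq_loop (grid : List (List String)) (n m : Int) :
    ∀ (N : Nat) (v : List (List Bool)) (x y : Int) (i : Nat)
      (rest : List (Int × Int × Nat)),
      pvCF v * 5 + (4 - i) ≤ N →
      runB grid n m v ((x, y, i) :: rest) =
        (if (dfsLoop grid n m v x y i).val.1 then (true, (dfsLoop grid n m v x y i).val.2)
         else runB grid n m (dfsLoop grid n m v x y i).val.2 rest) := by
  intro N
  induction N with
  | zero =>
    intro v x y i rest hN
    have h4 : 4 ≤ i := by omega
    rw [runB, dfsLoop]
    simp [h4]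
  | succ N ih =>
    intro v x y i rest hN
    by_cases h4 : 4 ≤ i
    · rw [runB, dfsLoop]; simp [h4]
    · by_cases hr : pvInRange (x + pvDxs[i]?.getD 0) (y + pvDys[i]?.getD 0) n m = false
      · rw [runB, dfsLoop, dif_neg h4, dif_neg h4, dif_pos hr, dif_pos hr]
        simp
      · by_cases he : pvElig grid v (x + pvDxs[i]?.getD 0) (y + pvDys[i]?.getD 0) = true
        · have hlt : pvCF (pvSetB v (x + pvDxs[i]?.getD 0) (y + pvDys[i]?.getD 0)) < pvCF v :=
            pvSetB_lt _ _ _ (pvInRange_nonneg hr).1 (pvInRange_nonneg hr).2 (pvElig_getB he)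
          rw [runB, dfsLoop, dif_neg h4, dif_neg h4, dif_neg hr, dif_neg hr, dif_pos he, dif_pos he]
          rw [ih _ _ _ _ _ (by omega)]
          rcases hq : dfsLoop grid n m (pvSetB v (x + pvDxs[i]?.getD 0) (y + pvDys[i]?.getD 0))
              (x + pvDxs[i]?.getD 0) (y + pvDys[i]?.getD 0) 0 with ⟨⟨b1, v1⟩, hp1⟩
          dsimp only
          by_cases hb1 : b1 = true
          · simp [hb1]
          · have h2 : pvCF v1 ≤ pvCF (pvSetB v (x + pvDxs[i]?.getD 0) (y + pvDys[i]?.getD 0)) := hp1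
            simp only [hb1, if_false, Bool.false_eq_true]
            rw [ih _ _ _ _ _ (by omega)]
        · rw [runB, dfsLoop, dif_neg h4, dif_neg h4, dif_neg hr, dif_neg hr, dif_neg he, dif_neg he]
          rw [ih _ _ _ _ _ (by omega)]

theorem dfs_eq_alt (grid : List (List String)) (x y : Int) (visited : List (List Bool))
    (n m : Int) : dfs grid x y visited n m = dfs_alt grid x y visited n m := by
  unfold dfs dfs_alt
  rw [runB_eq_loop grid n m (pvCF (pvSetB visited x y) * 5 + 4) _ _ _ _ _ (by omega)]
  by_cases hb : (dfsLoop grid n m (pvSetB visited x y) x y 0).val.1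
  · simp [hb]
  · rw [if_neg hb, runB]
    simpa using hb

-- ===== VERDICT (by name: the statement is the Claim_ definition above) =====
theorem dfs_spec : Claim_equal_dfs := by
  intro grid x y visited n m _ _
  unfold Spec_dfs
  exact dfs_eq_alt grid x y visited n m
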